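-- pv_equiv track=rewrite | github.com/DPChanny/SheetExtractorAI | SheetExtractor/FrequencyExtractor.py | find_max_dense_frequency_position
-- ===== SOURCE A (Python) =====
-- def find_max_dense_frequency_position(frequencies, size):
--     max_dense = min(frequencies) * size
--     max_dense_frequency_position = 0
--     for i in range(0, len(frequencies) - size):
--         current_dense = sum(frequencies[i: i + size])
--         if max_dense < current_dense:
--             max_dense = current_dense
--             max_dense_frequency_position = i
--     return max_dense_frequency_position + size // 2
-- ===== SOURCE B (Python) =====
-- def find_max_dense_frequency_position(frequencies, size):
--     best = min(frequencies) * size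
--     pos = 0
--     n = len(frequencies)
--     if 0 < size < n:
--         s = sum(frequencies[:size])
--         if best < s:
--             best = s
--             pos = 0
--         for i in range(1, n - size):
--             s += frequencies[i + size - 1] - frequencies[i - 1]
--             if best < s:
--                 best = s
--                 pos = i
--     return pos + size // 2
-- ===== Notes on version B (the rewrite author's own statement) =====
-- stated objective: faster
-- what changed: A recomputes each window sum by slicing (O(n*size)); B keeps one incremental sliding-window running sum, adding the entering element and subtracting the leaving one (O(n)).
-- outside the precondition, e.g. on find_max_dense_frequency_position([1, 2, 3], -2): A returns 0, B returns -1; on find_max_dense_frequency_position([], 2): A raises ValueError, B raises ValueError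
import Mathlib
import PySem

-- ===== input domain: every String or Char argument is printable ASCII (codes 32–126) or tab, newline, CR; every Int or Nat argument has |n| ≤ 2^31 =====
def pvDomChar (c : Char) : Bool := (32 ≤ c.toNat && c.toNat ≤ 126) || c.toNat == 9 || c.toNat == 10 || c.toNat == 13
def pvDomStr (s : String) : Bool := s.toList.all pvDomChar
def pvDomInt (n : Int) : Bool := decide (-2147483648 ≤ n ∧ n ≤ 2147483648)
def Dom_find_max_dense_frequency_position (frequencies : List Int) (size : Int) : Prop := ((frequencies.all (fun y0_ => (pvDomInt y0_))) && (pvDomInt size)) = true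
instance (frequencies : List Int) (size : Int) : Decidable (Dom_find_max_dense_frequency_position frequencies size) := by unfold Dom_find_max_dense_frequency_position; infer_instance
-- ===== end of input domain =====

-- B replaces A's per-window slice-and-sum with a single incremental sliding running sum.

-- ===== PORT A =====
def find_max_dense_frequency_position (frequencies : List Int) (size : Int) : Int :=
  let max_dense := ((PySem.List.min? frequencies (fun x => x)).getD 0) * size
  let st := (PySem.List.pyRange 0 ((frequencies.length : Int) - size) 1).foldl
    (fun (st : Int × Int) i =>
      let current_dense := (PySem.List.slice frequencies (some i) (some (i + size))).sum
      if st.1 < current_dense then (current_dense, i) else st)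
    (max_dense, 0)
  st.2 + PySem.Int.floordiv size 2

-- ===== PORT B =====
def find_max_dense_frequency_position_alt (frequencies : List Int) (size : Int) : Int :=
  let best := ((PySem.List.min? frequencies (fun x => x)).getD 0) * size
  let n : Int := (frequencies.length : Int)
  let pos : Int :=
    if 0 < size ∧ size < n then
      let s := (PySem.List.slice frequencies none (some size)).sum
      let bp : Int × Int := if best < s then (s, 0) else (best, 0)
      let st := (PySem.List.pyRange 1 (n - size) 1).foldl
        (fun (st : Int × Int × Int) i =>
          let s' := st.1 + PySem.List.pyGetD frequencies (i + size - 1) 0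
                         - PySem.List.pyGetD frequencies (i - 1) 0
          if st.2.1 < s' then (s', s', i) else (s', st.2.1, st.2.2))
        (s, bp)
      st.2.2
    else 0
  pos + PySem.Int.floordiv size 2

-- ===== PRECONDITION & SPEC =====
-- Pre_ excludes the empty list, on which A's min() raises ValueError, and negative size, an input
-- outside the natural domain (a window size) where A's slice stop index goes negative and Python's
-- wraparound makes A sum accidental suffix windows.
def Pre_find_max_dense_frequency_position (frequencies : List Int) (size : Int) : Prop :=
  frequencies ≠ [] ∧ 0 ≤ size
instance (frequencies : List Int) (size : Int) : Decidable (Pre_find_max_dense_frequency_position frequencies size) := by unfold Pre_find_max_dense_frequency_position; infer_instance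
def pvWitness_find_max_dense_frequency_position : List Int × Int := ([1, 2, 3], 2)

def Spec_find_max_dense_frequency_position (frequencies : List Int) (size : Int) (out : Int) : Prop := out = find_max_dense_frequency_position_alt frequencies size
instance (frequencies : List Int) (size : Int) (out : Int) : Decidable (Spec_find_max_dense_frequency_position frequencies size out) := by unfold Spec_find_max_dense_frequency_position; infer_instance

-- ===== CLAIM (what is proved, stated in full; the proofs are below) =====
def Claim_equal_find_max_dense_frequency_position : Prop := ∀ (frequencies : List Int) (size : Int), Dom_find_max_dense_frequency_position frequencies size → Pre_find_max_dense_frequency_position frequencies size → Spec_find_max_dense_frequency_position frequencies size (find_max_dense_frequency_position frequencies size)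

-- ===== LEMMAS AND PROOFS =====

-- sum of the window of (Nat) length k starting at (Nat) index j
def pvW (f : List Int) (k : Nat) (j : Nat) : Int := ((f.drop j).take k).sum

lemma pvW_slide (f : List Int) (k j : Nat) (hk : 0 < k) (h : j + k < f.length) :
    pvW f k (j + 1) = pvW f k j + f.getD (j + k) 0 - f.getD j 0 := by
  obtain ⟨k', rfl⟩ : ∃ k', k = k' + 1 := ⟨k - 1, by omega⟩
  have hj : j < f.length := by omega
  have hd : f.drop j = f[j] :: f.drop (j + 1) := List.drop_eq_getElem_cons hj
  have hlen : k' < (f.drop (j + 1)).length := by simp [List.length_drop]; omega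
  have htake : (f.drop (j + 1)).take (k' + 1)
      = (f.drop (j + 1)).take k' ++ [(f.drop (j + 1))[k']] := by
    rw [List.take_add_one]
    simp [List.getElem?_eq_getElem hlen]
  have hget : (f.drop (j + 1))[k'] = f[j + 1 + k'] := List.getElem_drop ..
  have h1 : f.getD (j + (k' + 1)) 0 = f[j + 1 + k'] := by
    rw [List.getD_eq_getElem _ _ (by omega)]; congr 1; omega
  have h2 : f.getD j 0 = f[j] := List.getD_eq_getElem _ _ hj
  rw [pvW, pvW, htake, hd, List.take_succ_cons, List.sum_append,
    hget, h1, h2, List.sum_cons, List.sum_nil]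
  simp [List.sum_cons]
  ring

-- B's loop over range(1, m), carrying the running window sum, computes exactly A's loop state
lemma pv_loop (f : List Int) (size : Int) (hs : 0 < size)
    (m : Int) (hm : m = (f.length : Int) - size) :
    ∀ (cnt : Nat) (a : Int), 1 ≤ a → a + cnt = m → ∀ (best pos : Int),
    (PySem.List.pyRange a m 1).foldl
        (fun (st : Int × Int × Int) i =>
          let s' := st.1 + PySem.List.pyGetD f (i + size - 1) 0
                         - PySem.List.pyGetD f (i - 1) 0
          if st.2.1 < s' then (s', s', i) else (s', st.2.1, st.2.2))
        (pvW f size.toNat (a - 1).toNat, best, pos)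
      = (pvW f size.toNat (m - 1).toNat,
         (PySem.List.pyRange a m 1).foldl
          (fun (st : Int × Int) i =>
            let c := (PySem.List.slice f (some i) (some (i + size))).sum
            if st.1 < c then (c, i) else st)
          (best, pos)) := by
  intro cnt
  induction cnt with
  | zero =>
    intro a ha hcnt best pos
    rw [PySem.List.pyRange_one_eq_nil (by omega)]
    have : a = m := by omega
    subst this
    simp
  | succ k ih =>
    intro a ha hcnt best pos
    have hab : a < m := by omega
    rw [PySem.List.pyRange_one_cons hab]
    simp only [List.foldl_cons]
    set j : Nat := (a - 1).toNat with hj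
    have hja : a.toNat = j + 1 := by omega
    have hlen : j + size.toNat < f.length := by omega
    have e1 : a + size - 1 = ((j + size.toNat : Nat) : Int) := by push_cast; omega
    have e2 : a - 1 = ((j : Nat) : Int) := by omega
    have hs' : pvW f size.toNat j + PySem.List.pyGetD f (a + size - 1) 0
             - PySem.List.pyGetD f (a - 1) 0 = pvW f size.toNat a.toNat := by
      rw [e1, e2, PySem.List.pyGetD_natCast, PySem.List.pyGetD_natCast, hja,
        pvW_slide f size.toNat j (by omega) hlen]
    have hc : (PySem.List.slice f (some a) (some (a + size))).sum = pvW f size.toNat a.toNat := by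
      rw [PySem.List.slice_toNat f (a := a) (b := a + size) (by omega) (by omega)]
      have : (a + size).toNat - a.toNat = size.toNat := by omega
      rw [this]; rfl
    have ha1 : ((a + 1) - 1).toNat = a.toNat := by omega
    simp only [hs', hc]
    by_cases hlt : best < pvW f size.toNat a.toNat
    · rw [if_pos hlt, if_pos hlt]
      have := ih (a + 1) (by omega) (by omega) (pvW f size.toNat a.toNat) a
      rw [ha1] at this
      exact this
    · rw [if_neg hlt, if_neg hlt]
      have := ih (a + 1) (by omega) (by omega) best pos
      rw [ha1] at this
      exact this

-- when size = 0 every window sum is 0 and A's loop never moves off its initial state (0, 0)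
lemma pv_zero (f : List Int) :
    ∀ (l : List Int), (∀ i ∈ l, 0 ≤ i) → ∀ (pos : Int),
    l.foldl
      (fun (st : Int × Int) i =>
        let c := (PySem.List.slice f (some i) (some (i + 0))).sum
        if st.1 < c then (c, i) else st)
      (0, pos) = (0, pos) := by
  intro l
  induction l with
  | nil => intro _ pos; rfl
  | cons x xs ih =>
    intro h pos
    have hx : 0 ≤ x := h x (List.mem_cons_self ..)
    have hc : (PySem.List.slice f (some x) (some (x + 0))).sum = 0 := by
      rw [PySem.List.slice_toNat f (a := x) (b := x + 0) (by omega) (by omega)]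
      have : (x + 0).toNat - x.toNat = 0 := by omega
      rw [this]
      simp
    simp only [List.foldl_cons, hc]
    rw [if_neg (by omega)]
    exact ih (fun i hi => h i (List.mem_cons_of_mem _ hi)) pos

-- ===== VERDICT (by name: the statement is the Claim_ definition above) =====
theorem find_max_dense_frequency_position_spec : Claim_equal_find_max_dense_frequency_position := by
  intro f size _ hpre
  obtain ⟨hne, hsz⟩ := hpre
  unfold Spec_find_max_dense_frequency_position
  unfold find_max_dense_frequency_position find_max_dense_frequency_position_alt
  dsimp only
  have hn : 0 < f.length := List.length_pos_iff.mpr hne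
  by_cases h0 : size = 0
  · subst h0
    have hguard : ¬ ((0:Int) < 0 ∧ (0:Int) < (f.length : Int)) := by omega
    rw [if_neg hguard]
    have hmd : ((PySem.List.min? f (fun x => x)).getD 0) * (0:Int) = 0 := mul_zero _
    rw [hmd, sub_zero,
      pv_zero f (PySem.List.pyRange 0 (f.length : Int) 1)
        (fun i hi => ((PySem.List.mem_pyRange_one).mp hi).1) 0]
  · have hspos : 0 < size := by omega
    by_cases hbig : (f.length : Int) ≤ size
    · -- no window fits: A's range is empty, B's guard fails
      rw [PySem.List.pyRange_one_eq_nil (by omega), if_neg (by omega)]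
      rfl
    · -- main case: 0 < size < len
      set m : Int := (f.length : Int) - size with hm
      have hm1 : 1 ≤ m := by omega
      rw [if_pos ⟨hspos, by omega⟩]
      rw [PySem.List.pyRange_one_cons (a := 0) (b := m) (by omega)]
      simp only [List.foldl_cons]
      -- B's initial running sum equals A's first window sum
      have hs0 : (PySem.List.slice f none (some size)).sum = pvW f size.toNat 0 := by
        rw [PySem.List.slice_to f (by omega)]
        rfl
      have hc0 : (PySem.List.slice f (some 0) (some (0 + size))).sum = pvW f size.toNat 0 := by
        rw [PySem.List.slice_toNat f (a := 0) (b := 0 + size) (by omega) (by omega)]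
        have : (0 + size).toNat - (0:Int).toNat = size.toNat := by omega
        rw [this]; rfl
      rw [hs0, hc0]
      have hloop := pv_loop f size hspos m rfl (m - 1).toNat 1 (by omega) (by omega)
      have h10 : ((1:Int) - 1).toNat = 0 := by omega
      rw [h10] at hloop
      dsimp only at hloop
      rw [show (0:Int) + 1 = 1 from by norm_num]
      by_cases hlt : ((PySem.List.min? f (fun x => x)).getD 0) * size < pvW f size.toNat 0
      · rw [if_pos hlt, hloop (pvW f size.toNat 0) 0]
      · rw [if_neg hlt, hloop _ 0]
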